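-- pv_equiv track=rewrite | github.com/CSStudySession/AlgoInPython | Meta/LC1762 Buildings With an Ocean View.py | num_of_buildings
-- ===== SOURCE A (Python) =====
-- def num_of_buildings(heights: list[int]) -> int:
--     if not heights:
--         return 0
--     max_height = heights[-1]
--     idx = len(heights) - 2
--     cnt = 1
--     while idx >= 0:
--         if heights[idx] > max_height:
--             cnt += 1
--             max_height = heights[idx]
--         idx -= 1
--     return cnt
-- ===== SOURCE B (Python) =====
-- def num_of_buildings(heights: list[int]) -> int:
--     stack: list[int] = []
--     for h in heights:
--         while stack and stack[-1] <= h: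
--             stack.pop()
--         stack.append(h)
--     return len(stack)
-- ===== Notes on version B (the rewrite author's own statement) =====
-- stated objective: alternative
-- what changed: Replaces the right-to-left running-max scan with a left-to-right monotonic stack (pop earlier buildings that are <= the current one) and returns the stack size.
import Mathlib
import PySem

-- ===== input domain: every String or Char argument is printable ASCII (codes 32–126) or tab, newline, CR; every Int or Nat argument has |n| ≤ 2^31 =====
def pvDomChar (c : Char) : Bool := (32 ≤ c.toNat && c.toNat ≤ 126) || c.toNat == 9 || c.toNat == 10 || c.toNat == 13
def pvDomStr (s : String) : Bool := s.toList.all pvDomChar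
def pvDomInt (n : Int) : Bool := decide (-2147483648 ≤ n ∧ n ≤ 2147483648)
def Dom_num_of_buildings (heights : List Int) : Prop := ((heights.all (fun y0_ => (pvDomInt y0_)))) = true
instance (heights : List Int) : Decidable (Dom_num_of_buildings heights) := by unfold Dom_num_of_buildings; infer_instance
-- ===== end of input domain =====

-- B replaces A's right-to-left running-max scan with a left-to-right monotonic stack; same cost, different structure (objective: alternative).

-- ===== PORT A =====
-- the while loop: idx counts down from len-2 to 0, keeping (max_height, cnt)
def pvNumLoopA (heights : List Int) (idx maxH cnt : Int) : Int :=
  if h : 0 ≤ idx then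
    if PySem.List.pyGetD heights idx 0 > maxH then
      pvNumLoopA heights (idx - 1) (PySem.List.pyGetD heights idx 0) (cnt + 1)
    else
      pvNumLoopA heights (idx - 1) maxH cnt
  else cnt
termination_by (idx + 1).toNat
decreasing_by all_goals omega

def num_of_buildings (heights : List Int) : Int :=
  if heights = [] then 0
  else pvNumLoopA heights ((heights.length : Int) - 2) (PySem.List.pyGetD heights (-1) 0) 1

-- ===== PORT B =====
-- the inner while loop: pop (drop the last element) while the top of the stack is <= h
def pvPopLoop (stack : List Int) (h : Int) : List Int :=
  if stack ≠ [] ∧ PySem.List.pyGetD stack (-1) 0 ≤ h then pvPopLoop stack.dropLast h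
  else stack
termination_by stack.length
decreasing_by
  rename_i hc
  have := hc.1
  have : stack.length ≠ 0 := by simpa [List.length_eq_zero_iff] using this
  simp [List.length_dropLast]
  omega

def num_of_buildings_alt (heights : List Int) : Int :=
  ((heights.foldl (fun st h => pvPopLoop st h ++ [h]) []).length : Int)

-- ===== PRECONDITION & SPEC =====
def Spec_num_of_buildings (heights : List Int) (out : Int) : Prop := out = num_of_buildings_alt heights
instance (heights : List Int) (out : Int) : Decidable (Spec_num_of_buildings heights out) := by unfold Spec_num_of_buildings; infer_instance

-- ===== CLAIM (what is proved, stated in full; the proofs are below) =====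
def Claim_equal_num_of_buildings : Prop := ∀ (heights : List Int), Dom_num_of_buildings heights → Spec_num_of_buildings heights (num_of_buildings heights)

-- ===== LEMMAS AND PROOFS =====

-- the strict running-max records of a list, scanned left to right, above a threshold m
def pvRecsAux (m : Int) : List Int → List Int
  | [] => []
  | x :: t => if x > m then x :: pvRecsAux x t else pvRecsAux m t

def pvRecs : List Int → List Int
  | [] => []
  | x :: t => x :: pvRecsAux x t

theorem pvRecsAux_dropWhile (t : List Int) : ∀ (x y : Int), y ≤ x →
    (pvRecsAux y t).dropWhile (fun z => decide (z ≤ x)) = pvRecsAux x t := by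
  induction t with
  | nil => intro x y _; simp [pvRecsAux]
  | cons z t ih =>
    intro x y hyx
    by_cases hzy : z > y
    · by_cases hzx : z > x
      · have hnz : ¬ z ≤ x := by omega
        simp [pvRecsAux, hzy, hzx, hnz]
      · have hzx' : z ≤ x := by omega
        simp [pvRecsAux, hzy, hzx, hzx']
        exact ih x z hzx'
    · have hzx : ¬ z > x := by omega
      simp [pvRecsAux, hzy, hzx]
      exact ih x y hyx

theorem pvRecs_dropWhile (r : List Int) (x : Int) :
    (pvRecs r).dropWhile (fun z => decide (z ≤ x)) = pvRecsAux x r := by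
  cases r with
  | nil => simp [pvRecs, pvRecsAux]
  | cons y t =>
    by_cases hyx : y > x
    · have hny : ¬ y ≤ x := by omega
      simp [pvRecs, pvRecsAux, hyx, hny]
    · have hyx' : y ≤ x := by omega
      simp [pvRecs, pvRecsAux, hyx, hyx']
      exact pvRecsAux_dropWhile t x y hyx'

theorem pvPopLoop_eq (rs : List Int) (h : Int) :
    pvPopLoop rs.reverse h = (rs.dropWhile (fun z => decide (z ≤ h))).reverse := by
  induction rs with
  | nil => simp [pvPopLoop]
  | cons a t ih =>
    rw [pvPopLoop]
    by_cases hah : a ≤ h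
    · rw [if_pos]
      · have hd : (a :: t).reverse.dropLast = t.reverse := by
          simp [List.reverse_cons]
        rw [hd, ih]
        simp [List.dropWhile, hah]
      · constructor
        · simp
        · rw [List.reverse_cons, PySem.List.pyGetD_neg_one_append_singleton]
          exact hah
    · rw [if_neg]
      · simp [List.dropWhile, hah]
      · intro hc
        have := hc.2
        rw [List.reverse_cons, PySem.List.pyGetD_neg_one_append_singleton] at this
        exact hah this

theorem pvFoldl_eq (l : List Int) : ∀ (rs : List Int),
    List.foldl (fun st h => pvPopLoop st h ++ [h]) rs.reverse l =
      (List.foldl (fun rs h => h :: rs.dropWhile (fun z => decide (z ≤ h))) rs l).reverse := by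
  induction l with
  | nil => intro rs; simp
  | cons h t ih =>
    intro rs
    have : pvPopLoop rs.reverse h ++ [h] = (h :: rs.dropWhile (fun z => decide (z ≤ h))).reverse := by
      rw [pvPopLoop_eq]; simp
    simp only [List.foldl_cons, this]
    exact ih _

theorem pvRFold_recs (l : List Int) :
    List.foldl (fun rs h => h :: rs.dropWhile (fun z => decide (z ≤ h))) [] l = pvRecs l.reverse := by
  induction l using List.reverseRecOn with
  | nil => simp [pvRecs]
  | append_singleton l x ih =>
    rw [List.foldl_append, ih]
    simp only [List.foldl_cons, List.foldl_nil, List.reverse_append, List.reverse_cons,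
      List.reverse_nil, List.nil_append, List.singleton_append]
    rw [pvRecs_dropWhile]
    rfl

theorem pvAlt_eq_recs (heights : List Int) :
    num_of_buildings_alt heights = ((pvRecs heights.reverse).length : Int) := by
  unfold num_of_buildings_alt
  have h1 : List.foldl (fun st h => pvPopLoop st h ++ [h]) [] heights =
      (List.foldl (fun rs h => h :: rs.dropWhile (fun z => decide (z ≤ h))) [] heights).reverse := by
    simpa using pvFoldl_eq heights []
  rw [h1, pvRFold_recs]
  simp

theorem pvNumLoopA_eq (heights : List Int) : ∀ (n : ℕ), n ≤ heights.length → ∀ (m c : Int),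
    pvNumLoopA heights ((n : Int) - 1) m c = c + ((pvRecsAux m (heights.take n).reverse).length : Int) := by
  intro n
  induction n with
  | zero =>
    intro _ m c
    rw [pvNumLoopA, dif_neg (by omega)]
    simp [pvRecsAux]
  | succ n ih =>
    intro hn m c
    have hn' : n < heights.length := by omega
    have hidx : ((n + 1 : ℕ) : Int) - 1 = (n : Int) := by push_cast; ring
    rw [hidx, pvNumLoopA, dif_pos (by positivity)]
    have hget : PySem.List.pyGetD heights (n : Int) 0 = heights[n] :=
      PySem.List.pyGetD_ofNat heights n 0 hn'
    have htake : (heights.take (n + 1)).reverse = heights[n] :: (heights.take n).reverse := by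
      rw [List.take_add_one]
      simp [List.getElem?_eq_getElem hn']
    rw [hget, htake]
    by_cases hc : heights[n] > m
    · rw [if_pos hc]
      have : (n : Int) - 1 = ((n : ℕ) : Int) - 1 := rfl
      rw [this, ih (by omega)]
      simp [pvRecsAux, hc]
      ring
    · rw [if_neg hc]
      have : (n : Int) - 1 = ((n : ℕ) : Int) - 1 := rfl
      rw [this, ih (by omega)]
      simp [pvRecsAux, hc]

-- ===== VERDICT (by name: the statement is the Claim_ definition above) =====
theorem num_of_buildings_spec : Claim_equal_num_of_buildings := by
  intro heights _
  unfold Spec_num_of_buildings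
  by_cases hne : heights = []
  · subst hne
    simp [num_of_buildings, num_of_buildings_alt]
  · have hlen : 1 ≤ heights.length := by
      cases heights with
      | nil => exact absurd rfl hne
      | cons a t => simp
    rw [num_of_buildings, if_neg hne, pvAlt_eq_recs]
    have hrev : heights.reverse = heights.getLast hne :: (heights.take (heights.length - 1)).reverse := by
      conv_lhs => rw [← List.dropLast_append_getLast hne]
      rw [← List.dropLast_eq_take]
      simp
    have hidx : ((heights.length : ℕ) : Int) - 2 = ((heights.length - 1 : ℕ) : Int) - 1 := by
      omega
    rw [hidx, PySem.List.pyGetD_neg_one heights 0 hne,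
      pvNumLoopA_eq heights (heights.length - 1) (by omega), hrev]
    simp [pvRecs]
    ring
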